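-- pv_equiv track=rewrite | github.com/AlexisRmnk/practicaInformatorio2022 | prog_web/01_python/practicas_01_informatorio/ejercicios_complementarios/03_funciones/ej08.py | capitalizeStringV1
-- ===== SOURCE A (Python) =====
-- def capitalizeStringV1(string_): # Read detail below
--     '''
--     Doesn't use lists and works except for the "I" case
--     '''
--     previous_char = previous_to_previous_char = new_string = ""
--     for char_ in string_:
--         if (previous_char == "¿" or previous_char == "."
--             or previous_char == "¡" or previous_char == ""
--             or previous_char == "?" or previous_char == "!"
--             or (previous_to_previous_char == "." and previous_char == " ")
--             or (previous_to_previous_char == "?" and previous_char == " ")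
--             or (previous_to_previous_char == "!" and previous_char == " ")):
--             char_ = char_.upper()
--         new_string = new_string + str(char_)
--         previous_to_previous_char = previous_char
--         previous_char = char_
--     return new_string
-- ===== SOURCE B (Python) =====
-- def capitalizeStringV1(string_):
--     # Regex-style staged substitution (no state machine): three whole-string
--     # passes, each zipping the string with shifted copies of itself.
--     if not string_:
--         return ""
--     # pass 0: capitalize the first character
--     s = string_[0].upper() + string_[1:]
--     # pass 1: capitalize every character directly preceded by an opener/closer
--     s = s[0] + ''.join(b.upper() if a in '¿¡.?!' else b for a, b in zip(s, s[1:]))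
--     # pass 2: capitalize every character preceded by closer-then-space
--     s = s[:2] + ''.join(c.upper() if (a in '.?!' and b == ' ') else c
--                         for a, b, c in zip(s, s[1:], s[2:]))
--     return s
-- ===== Notes on version B (the rewrite author's own statement) =====
-- stated objective: alternative
-- what changed: A makes one stateful scan threading the two previously-built characters through the loop with repeated string concatenation; B does regex-substitution-style staged rewriting: uppercase the first character, then two independent whole-string passes built by zipping the string with its shifted copies (1-char lookbehind pass, then 2-char lookbehind pass), correct because the trigger characters and space are fixed points of upper() and upper() is idempotent.
import Mathlib
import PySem

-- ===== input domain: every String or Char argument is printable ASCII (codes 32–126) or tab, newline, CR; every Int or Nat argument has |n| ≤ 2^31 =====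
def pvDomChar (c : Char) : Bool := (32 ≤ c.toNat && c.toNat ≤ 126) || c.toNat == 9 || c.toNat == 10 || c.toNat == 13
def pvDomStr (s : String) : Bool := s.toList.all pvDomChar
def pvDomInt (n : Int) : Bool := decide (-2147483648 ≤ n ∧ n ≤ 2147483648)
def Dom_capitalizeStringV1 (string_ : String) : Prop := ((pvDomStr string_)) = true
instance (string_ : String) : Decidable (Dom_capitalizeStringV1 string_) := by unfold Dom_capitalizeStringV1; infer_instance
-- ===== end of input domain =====

-- B replaces A's running two-variable state machine by three staged whole-string
-- substitution passes (first char, 1-char lookbehind, 2-char lookbehind), each a zip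
-- of the string with shifted copies of itself (alternative decomposition, regex-sub style).


-- ===== PORT A =====
-- A's big if-condition, on the state (previous_to_previous_char, previous_char);
-- "" (no previous char yet) is modelled as none, a one-char string as some c.
def capAcond (pprev prev : Option Char) : Bool :=
  prev == some '¿' || prev == some '.'
    || prev == some '¡' || prev == none
    || prev == some '?' || prev == some '!'
    || (pprev == some '.' && prev == some ' ')
    || (pprev == some '?' && prev == some ' ')
    || (pprev == some '!' && prev == some ' ')

-- one iteration of A's loop: state = (previous_to_previous_char, previous_char, new_string)
def capAstep (st : Option Char × Option Char × List Char) (char_ : Char) :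
    Option Char × Option Char × List Char :=
  let c := if capAcond st.1 st.2.1 then PySem.Chars.upperChar char_ else char_
  (st.2.1, some c, st.2.2 ++ [c])

def capitalizeStringV1 (string_ : String) : String :=
  String.ofList (string_.toList.foldl capAstep (none, none, [])).2.2

-- ===== PORT B =====
def capT1 : List Char := ['¿', '¡', '.', '?', '!']
def capT2 : List Char := ['.', '?', '!']

-- Source B pass 1: b.upper() if a in '¿¡.?!' else b, zipped over (s, s[1:])
def capBpass1f (a b : Char) : Char :=
  if capT1.contains a then PySem.Chars.upperChar b else b

-- Source B pass 2: c.upper() if (a in '.?!' and b == ' ') else c, zipped over (s, s[1:], s[2:])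
def capBpass2f (a b c : Char) : Char :=
  if capT2.contains a && (b == ' ') then PySem.Chars.upperChar c else c

-- zip of three lists (Python's zip truncates to the shortest)
def capZip3 : List Char → List Char → List Char → List Char
  | a :: as, b :: bs, c :: cs => capBpass2f a b c :: capZip3 as bs cs
  | _, _, _ => []

-- s[0] + ''.join(... for a, b in zip(s, s[1:]))
def capPass1 (s : List Char) : List Char :=
  s.take 1 ++ List.zipWith capBpass1f s (s.drop 1)

-- s[:2] + ''.join(... for a, b, c in zip(s, s[1:], s[2:]))
def capPass2 (s : List Char) : List Char :=
  s.take 2 ++ capZip3 s (s.drop 1) (s.drop 2)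

def capitalizeStringV1_alt (string_ : String) : String :=
  match string_.toList with
  | [] => ""                      -- if not string_: return ""
  | c0 :: rest =>                 -- s = string_[0].upper() + string_[1:], then the two passes
    String.ofList (capPass2 (capPass1 (PySem.Chars.upperChar c0 :: rest)))

-- ===== PRECONDITION & SPEC =====
def Spec_capitalizeStringV1 (string_ : String) (out : String) : Prop := out = capitalizeStringV1_alt string_
instance (string_ : String) (out : String) : Decidable (Spec_capitalizeStringV1 string_ out) := by unfold Spec_capitalizeStringV1; infer_instance

-- ===== CLAIM (what is proved, stated in full; the proofs are below) =====
def Claim_equal_capitalizeStringV1 : Prop := ∀ (string_ : String), Dom_capitalizeStringV1 string_ → Spec_capitalizeStringV1 string_ (capitalizeStringV1 string_)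

-- ===== LEMMAS AND PROOFS =====

-- A's loop as a structural recursion on the remaining input (state = the two previous
-- TRANSFORMED characters, as A keeps them).
def specA (pprev prev : Option Char) : List Char → List Char
  | [] => []
  | c :: rest =>
    let c' := if capAcond pprev prev then PySem.Chars.upperChar c else c
    c' :: specA prev (some c') rest

-- the same recursion, but keeping the two previous ORIGINAL characters.
def specB (pprev prev : Option Char) : List Char → List Char
  | [] => []
  | c :: rest =>
    (if capAcond pprev prev then PySem.Chars.upperChar c else c) :: specB prev (some c) rest

-- relation between an original char and what A stored for it
def relC (c c' : Char) : Prop := c' = c ∨ c' = PySem.Chars.upperChar c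
def relO : Option Char → Option Char → Prop
  | none, none => True
  | some c, some c' => relC c c'
  | _, _ => False

lemma upperChar_eq_trigger (c t : Char)
    (ht : t.toNat < 65 ∨ 90 < t.toNat) (ht2 : PySem.Chars.islower t = false) :
    (PySem.Chars.upperChar c = t) ↔ (c = t) := by
  unfold PySem.Chars.upperChar
  by_cases hl : PySem.Chars.islower c = true
  · have hb : 97 ≤ c.toNat ∧ c.toNat ≤ 122 := by
      simp only [PySem.Chars.islower, Bool.and_eq_true, decide_eq_true_eq, Char.le_def,
        UInt32.le_iff_toNat_le] at hl
      exact hl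
    rw [if_pos hl]
    constructor
    · intro h
      exfalso
      have hv : (Char.ofNat (c.toNat - 32)).toNat = c.toNat - 32 := by
        rw [Char.toNat_ofNat, if_pos]
        constructor
        omega
      have := congrArg Char.toNat h
      rw [hv] at this
      omega
    · intro h
      exfalso
      rw [h] at hl
      rw [hl] at ht2
      simp at ht2
  · rw [if_neg hl]

lemma upperChar_idem (c : Char) :
    PySem.Chars.upperChar (PySem.Chars.upperChar c) = PySem.Chars.upperChar c := by
  by_cases hl : PySem.Chars.islower c = true
  · have hb : 97 ≤ c.toNat ∧ c.toNat ≤ 122 := by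
      simp only [PySem.Chars.islower, Bool.and_eq_true, decide_eq_true_eq, Char.le_def,
        UInt32.le_iff_toNat_le] at hl
      exact hl
    have h1 : PySem.Chars.upperChar c = Char.ofNat (c.toNat - 32) := by
      unfold PySem.Chars.upperChar; rw [if_pos hl]
    have hv : (Char.ofNat (c.toNat - 32)).toNat = c.toNat - 32 := by
      rw [Char.toNat_ofNat, if_pos]
      constructor
      omega
    have h2 : PySem.Chars.islower (Char.ofNat (c.toNat - 32)) = false := by
      simp only [PySem.Chars.islower, Bool.and_eq_false_iff, decide_eq_false_iff_not,
        Char.le_def, UInt32.le_iff_toNat_le]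
      left
      rw [show ('a'.val.toNat : Nat) = 97 from rfl,
          show (Char.ofNat (c.toNat - 32)).val.toNat = c.toNat - 32 from hv]
      omega
    rw [h1]
    unfold PySem.Chars.upperChar
    rw [if_neg (by rw [h2]; exact Bool.false_ne_true)]
  · have h0 : PySem.Chars.upperChar c = c := by
      unfold PySem.Chars.upperChar; rw [if_neg hl]
    rw [h0, h0]

lemma relC_eq_trigger (c c' t : Char) (h : relC c c')
    (ht : t.toNat < 65 ∨ 90 < t.toNat) (ht2 : PySem.Chars.islower t = false) :
    (c' = t) ↔ (c = t) := by
  rcases h with h | h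
  · simp [h]
  · rw [h]; exact upperChar_eq_trigger c t ht ht2

lemma relC_beq (sc c t : Char) (h : relC sc c)
    (ht : t.toNat < 65 ∨ 90 < t.toNat) (ht2 : PySem.Chars.islower t = false) :
    (c == t) = (sc == t) := by
  rw [Bool.eq_iff_iff, beq_iff_eq, beq_iff_eq]
  exact relC_eq_trigger sc c t h ht ht2

-- membership in a list of non-letter, upper-fixed trigger chars is invariant under relC
lemma contains_rel (sc c : Char) (h : relC sc c) (T : List Char)
    (hT : ∀ t ∈ T, (t.toNat < 65 ∨ 90 < t.toNat) ∧ PySem.Chars.islower t = false) :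
    (T.contains c) = (T.contains sc) := by
  induction T with
  | nil => rfl
  | cons t ts ih =>
    rcases List.forall_mem_cons.mp hT with ⟨⟨ht, ht2⟩, hts⟩
    simp only [List.contains_cons]
    rw [relC_beq sc c t h ht ht2, ih hts]

-- the six characters A's condition tests for are fixed points of .upper(), so the test
-- gives the same answer on the stored (possibly uppercased) char as on the original
lemma relO_beq_some (o o' : Option Char) (h : relO o o') (t : Char)
    (ht : t.toNat < 65 ∨ 90 < t.toNat) (ht2 : PySem.Chars.islower t = false) :
    (o' == some t) = (o == some t) := by
  cases o <;> cases o' <;> simp [relO] at h ⊢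
  exact relC_eq_trigger _ _ _ h ht ht2

lemma relO_beq_none (o o' : Option Char) (h : relO o o') :
    (o' == none) = (o == none) := by
  cases o <;> cases o' <;> simp [relO] at h ⊢

lemma capAcond_rel (pp pp' prev prev' : Option Char) (h1 : relO pp pp') (h2 : relO prev prev') :
    capAcond pp' prev' = capAcond pp prev := by
  unfold capAcond
  rw [relO_beq_some _ _ h2 '¿' (by decide) (by decide),
      relO_beq_some _ _ h2 '.' (by decide) (by decide),
      relO_beq_some _ _ h2 '¡' (by decide) (by decide),
      relO_beq_none _ _ h2,
      relO_beq_some _ _ h2 '?' (by decide) (by decide),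
      relO_beq_some _ _ h2 '!' (by decide) (by decide),
      relO_beq_some _ _ h2 ' ' (by decide) (by decide),
      relO_beq_some _ _ h1 '.' (by decide) (by decide),
      relO_beq_some _ _ h1 '?' (by decide) (by decide),
      relO_beq_some _ _ h1 '!' (by decide) (by decide)]

lemma specA_eq_specB (cs : List Char) : ∀ (pp pp' prev prev' : Option Char),
    relO pp pp' → relO prev prev' → specA pp' prev' cs = specB pp prev cs := by
  induction cs with
  | nil => intro _ _ _ _ _ _; rfl
  | cons c rest ih =>
    intro pp pp' prev prev' h1 h2
    simp only [specA, specB, capAcond_rel pp pp' prev prev' h1 h2]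
    congr 1
    apply ih _ _ _ _ h2
    by_cases hc : capAcond pp prev = true
    · simp only [hc, if_pos]
      exact Or.inr rfl
    · simp only [Bool.not_eq_true] at hc
      simp only [hc, Bool.false_eq_true, if_neg, not_false_iff]
      exact Or.inl rfl

lemma foldA_eq_specA (cs : List Char) : ∀ (pp prev : Option Char) (acc : List Char),
    (cs.foldl capAstep (pp, prev, acc)).2.2 = acc ++ specA pp prev cs := by
  induction cs with
  | nil => intro pp prev acc; simp [specA]
  | cons c rest ih =>
    intro pp prev acc
    simp only [List.foldl_cons, capAstep, specA]
    rw [ih]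
    simp

-- ---- B-side: the staged passes equal the original-lookbehind recursion specB ----

-- pass 1 as a recursion keeping the ORIGINAL previous character
def capG1 (prev : Char) : List Char → List Char
  | [] => []
  | c :: t => (if capT1.contains prev then PySem.Chars.upperChar c else c) :: capG1 c t

lemma capT1_fixed : ∀ t ∈ capT1, (t.toNat < 65 ∨ 90 < t.toNat) ∧ PySem.Chars.islower t = false := by
  intro t ht
  simp only [capT1, List.mem_cons, List.not_mem_nil, or_false] at ht
  rcases ht with rfl | rfl | rfl | rfl | rfl <;> exact ⟨by decide, by decide⟩

lemma capT2_fixed : ∀ t ∈ capT2, (t.toNat < 65 ∨ 90 < t.toNat) ∧ PySem.Chars.islower t = false := by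
  intro t ht
  simp only [capT2, List.mem_cons, List.not_mem_nil, or_false] at ht
  rcases ht with rfl | rfl | rfl <;> exact ⟨by decide, by decide⟩

lemma zip1_eq_capG1 (r : List Char) : ∀ (sp p : Char), relC sp p →
    List.zipWith capBpass1f (p :: r) r = capG1 sp r := by
  induction r with
  | nil => intro _ _ _; rfl
  | cons b r2 ih =>
    intro sp p h
    rw [List.zipWith_cons_cons]
    simp only [capG1]
    congr 1
    · unfold capBpass1f
      rw [contains_rel sp p h capT1 capT1_fixed]
    · exact ih b b (Or.inl rfl)

lemma capAcond_some_eq (sa sb : Char) :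
    capAcond (some sa) (some sb) = (capT1.contains sb || (capT2.contains sa && (sb == ' '))) := by
  rw [Bool.eq_iff_iff]
  simp [capAcond, capT1, capT2, List.contains_eq_mem]
  tauto

lemma capAcond_none_some (c : Char) : capAcond none (some c) = capT1.contains c := by
  rw [Bool.eq_iff_iff]
  simp [capAcond, capT1, List.contains_eq_mem]
  tauto

lemma if_if_upper (q1 q2 : Bool) (c : Char) :
    (if q2 then PySem.Chars.upperChar (if q1 then PySem.Chars.upperChar c else c)
     else (if q1 then PySem.Chars.upperChar c else c))
      = if (q1 || q2) then PySem.Chars.upperChar c else c := by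
  cases q1 <;> cases q2 <;> simp [upperChar_idem]

lemma zip3_eq_specB (r : List Char) : ∀ (sa sb a b : Char), relC sa a → relC sb b →
    capZip3 (a :: b :: capG1 sb r) (b :: capG1 sb r) (capG1 sb r)
      = specB (some sa) (some sb) r := by
  induction r with
  | nil => intro _ _ _ _ _ _; rfl
  | cons c t ih =>
    intro sa sb a b ha hb
    have hg : capG1 sb (c :: t)
        = (if capT1.contains sb then PySem.Chars.upperChar c else c) :: capG1 c t := rfl
    rw [hg]
    show capBpass2f a b (if capT1.contains sb then PySem.Chars.upperChar c else c)
        :: capZip3 (b :: (if capT1.contains sb then PySem.Chars.upperChar c else c) :: capG1 c t)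
             ((if capT1.contains sb then PySem.Chars.upperChar c else c) :: capG1 c t) (capG1 c t)
      = specB (some sa) (some sb) (c :: t)
    unfold specB
    congr 1
    · unfold capBpass2f
      rw [contains_rel sa a ha capT2 capT2_fixed,
          relC_beq sb b ' ' hb (by decide) (by decide),
          if_if_upper, capAcond_some_eq]
    · refine ih sb c b _ hb ?_
      by_cases h1 : capT1.contains sb = true
      · rw [if_pos h1]; exact Or.inr rfl
      · rw [if_neg (by simp at h1 ⊢; exact h1)]; exact Or.inl rfl

-- ===== VERDICT (by name: the statement is the Claim_ definition above) =====
theorem capitalizeStringV1_spec : Claim_equal_capitalizeStringV1 := by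
  intro s _
  unfold Spec_capitalizeStringV1 capitalizeStringV1 capitalizeStringV1_alt
  rw [foldA_eq_specA, specA_eq_specB _ none none none none trivial trivial]
  cases hl : s.toList with
  | nil => rfl
  | cons c rest =>
    cases rest with
    | nil =>
      show String.ofList (specB none none [c]) = _
      simp [specB, capAcond, capPass1, capPass2, capZip3]
    | cons d r =>
      show String.ofList (specB none none (c :: d :: r))
        = String.ofList (capPass2 (capPass1 (PySem.Chars.upperChar c :: d :: r)))
      have h1 : capPass1 (PySem.Chars.upperChar c :: d :: r)
          = PySem.Chars.upperChar c :: capG1 c (d :: r) := by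
        unfold capPass1
        rw [show (PySem.Chars.upperChar c :: d :: r).drop 1 = d :: r from rfl,
            zip1_eq_capG1 (d :: r) c (PySem.Chars.upperChar c) (Or.inr rfl)]
        rfl
      have hg : capG1 c (d :: r)
          = (if capT1.contains c then PySem.Chars.upperChar d else d) :: capG1 d r := rfl
      have h2 : capPass2 (PySem.Chars.upperChar c
            :: (if capT1.contains c then PySem.Chars.upperChar d else d) :: capG1 d r)
          = PySem.Chars.upperChar c :: (if capT1.contains c then PySem.Chars.upperChar d else d)
            :: specB (some c) (some d) r := by
        unfold capPass2
        rw [show ∀ x y : Char, ∀ v : List Char, (x :: y :: v).drop 1 = y :: v from fun _ _ _ => rfl,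
            show ∀ x y : Char, ∀ v : List Char, (x :: y :: v).drop 2 = v from fun _ _ _ => rfl]
        rw [zip3_eq_specB r c d (PySem.Chars.upperChar c)
              (if capT1.contains c then PySem.Chars.upperChar d else d) (Or.inr rfl)
              (by by_cases h : capT1.contains c = true
                  · rw [if_pos h]; exact Or.inr rfl
                  · rw [if_neg (by simp at h ⊢; exact h)]; exact Or.inl rfl)]
        rfl
      rw [h1, hg, h2]
      have hspec : specB none none (c :: d :: r)
          = PySem.Chars.upperChar c :: (if capT1.contains c then PySem.Chars.upperChar d else d)
            :: specB (some c) (some d) r := by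
        simp only [specB]
        rw [show capAcond none none = true from rfl, capAcond_none_some]
        simp
      rw [hspec]
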